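-- pv_equiv track=rewrite | github.com/jsg921019/algorithm_study | stack/괄호의_값.py | solution
-- ===== SOURCE A (Python) =====
-- def solution(s):
--     d = {']':'[', ')':'('}
--     paren_stack = []
--     num_stack = [0]
--     for c in s:
--         if c in d:
--             if paren_stack and paren_stack.pop() == d[c]:
--                 num = num_stack.pop()
--                 if num:
--                     num_stack[-1] += (2 if c == ')' else 3)*num
--                 else:
--                     num_stack[-1] += 2 if c == ')' else 3
--             else:
--                 return 0
--         else:
--             paren_stack.append(c)
--             num_stack.append(0)
--     if paren_stack:
--         return 0
--     else:
--         return num_stack[0]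
-- ===== SOURCE B (Python) =====
-- def solution(s):
--     stack = []
--     temp = 1
--     answer = 0
--     prev = None
--     for c in s:
--         if c == '(':
--             stack.append(c)
--             temp *= 2
--         elif c == '[':
--             stack.append(c)
--             temp *= 3
--         elif c == ')':
--             if not stack or stack[-1] != '(':
--                 return 0
--             if prev == '(':
--                 answer += temp
--             stack.pop()
--             temp //= 2
--         elif c == ']':
--             if not stack or stack[-1] != '[':
--                 return 0
--             if prev == '[':
--                 answer += temp
--             stack.pop()
--             temp //= 3
--         else:
--             return 0
--         prev = c
--     return 0 if stack else answer
-- ===== Notes on version B (the rewrite author's own statement) =====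
-- stated objective: alternative
-- what changed: Replaces A's two-stack design (a paren stack plus a stack of partial sums combined on every close) by a single bracket stack with one running multiplier temp and a scalar accumulator; non-bracket characters and mismatches return 0 immediately instead of being pushed as unmatchable opens, which also lets B stop early where A keeps scanning.
import Mathlib
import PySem

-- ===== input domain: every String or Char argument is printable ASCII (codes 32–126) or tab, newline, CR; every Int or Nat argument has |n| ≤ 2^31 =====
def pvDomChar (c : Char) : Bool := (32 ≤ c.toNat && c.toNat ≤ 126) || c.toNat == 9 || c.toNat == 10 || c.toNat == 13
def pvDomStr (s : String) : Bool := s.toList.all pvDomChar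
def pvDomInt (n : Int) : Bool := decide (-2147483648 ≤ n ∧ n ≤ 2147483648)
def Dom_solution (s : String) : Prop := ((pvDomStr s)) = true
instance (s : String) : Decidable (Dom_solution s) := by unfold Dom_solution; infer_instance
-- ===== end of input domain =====

-- B replaces A's stack of partial sums by a single running multiplier and a scalar
-- accumulator, and returns 0 as soon as a non-bracket or mismatched character is seen
-- (alternative decomposition; the early exit was measured faster on invalid inputs).

-- ===== PORT A =====
-- A's loop with early returns, transliterated as structural recursion over the
-- remaining characters; both stacks keep their top at the head.
def runA : List Char → List Char → List Int → Int
  | [], ps, ns => if ps.isEmpty then ns.headD 0 else 0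
  | c :: cs, ps, ns =>
    if c = ')' ∨ c = ']' then
      match ps, ns with
      | p :: ps', num :: m :: ns' =>
        if p = (if c = ')' then '(' else '[') then
          runA cs ps'
            ((m + (if num ≠ 0 then (if c = ')' then 2 else 3) * num
                   else (if c = ')' then 2 else 3))) :: ns')
        else 0
      | _, _ => 0
    else runA cs (c :: ps) (0 :: ns)

def solution (s : String) : Int := runA s.toList [] [0]

-- ===== PORT B =====
-- B's loop: stack of open brackets, multiplier temp, accumulator ans, previous char.
def runB : List Char → List Char → Int → Int → Option Char → Int
  | [], st, _, ans, _ => if st.isEmpty then ans else 0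
  | c :: cs, st, temp, ans, prev =>
    if c = '(' then runB cs ('(' :: st) (temp * 2) ans (some '(')
    else if c = '[' then runB cs ('[' :: st) (temp * 3) ans (some '[')
    else if c = ')' then
      match st with
      | p :: st' =>
        if p = '(' then
          runB cs st' (PySem.Int.floordiv temp 2)
            (if prev = some '(' then ans + temp else ans) (some ')')
        else 0
      | [] => 0
    else if c = ']' then
      match st with
      | p :: st' =>
        if p = '[' then
          runB cs st' (PySem.Int.floordiv temp 3)
            (if prev = some '[' then ans + temp else ans) (some ']')
        else 0
      | [] => 0
    else 0

def solution_alt (s : String) : Int := runB s.toList [] 1 0 none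

-- ===== PRECONDITION & SPEC =====
def Spec_solution (s : String) (out : Int) : Prop := out = solution_alt s
instance (s : String) (out : Int) : Decidable (Spec_solution s out) := by unfold Spec_solution; infer_instance

-- ===== CLAIM (what is proved, stated in full; the proofs are below) =====
def Claim_equal_solution : Prop := ∀ (s : String), Dom_solution s → Spec_solution s (solution s)

-- ===== LEMMAS AND PROOFS =====

-- product of the weights (2 for '(', 3 otherwise) of the open-bracket stack
def weight : List Char → Int
  | [] => 1
  | c :: st => (if c = '(' then 2 else 3) * weight st

-- value represented by A's two stacks: Σ nᵢ · (product of the weights below nᵢ)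
def val : List Char → List Int → Int
  | c :: ps, n :: ns => n * weight (c :: ps) + val ps ns
  | _, ns => ns.headD 0

def Opens (ps : List Char) : Prop := ∀ c ∈ ps, c = '(' ∨ c = '['

def StInv (ps : List Char) (ns : List Int) (prev : Option Char) : Prop :=
  ns.length = ps.length + 1 ∧ (∀ n ∈ ns, 0 ≤ n) ∧
  (match ps, ns with
   | p :: _, n :: _ => (n = 0 ↔ prev = some p)
   | _, _ => True)

lemma val_addtop (ps : List Char) (m k : Int) (ns : List Int) :
    val ps ((m + k) :: ns) = val ps (m :: ns) + k * weight ps := by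
  cases ps with
  | nil => simp [val, weight]
  | cons c ps => simp only [val]; ring

lemma fd_cancel (w t : Int) (hw : w ≠ 0) : PySem.Int.floordiv (w * t) w = t := by
  have h : PySem.Int.floordiv (w * t) w = (w * t).fdiv w := rfl
  rw [h, Int.mul_fdiv_cancel_left _ hw]

lemma runB_open_paren (cs st : List Char) (temp ans : Int) (prev : Option Char) :
    runB ('(' :: cs) st temp ans prev = runB cs ('(' :: st) (temp * 2) ans (some '(') := by
  simp [runB]

lemma runB_open_brack (cs st : List Char) (temp ans : Int) (prev : Option Char) :
    runB ('[' :: cs) st temp ans prev = runB cs ('[' :: st) (temp * 3) ans (some '[') := by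
  simp [runB]

lemma runB_close_paren (cs st : List Char) (temp ans : Int) (prev : Option Char) :
    runB (')' :: cs) ('(' :: st) temp ans prev =
      runB cs st (PySem.Int.floordiv temp 2)
        (if prev = some '(' then ans + temp else ans) (some ')') := by
  simp [runB]

lemma runB_close_brack (cs st : List Char) (temp ans : Int) (prev : Option Char) :
    runB (']' :: cs) ('[' :: st) temp ans prev =
      runB cs st (PySem.Int.floordiv temp 3)
        (if prev = some '[' then ans + temp else ans) (some ']') := by
  simp [runB]

lemma X_pos (num m w : Int) (hnum0 : 0 ≤ num) (hm0 : 0 ≤ m) (hw : 2 ≤ w) :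
    0 < m + (if num ≠ 0 then w * num else w) := by
  by_cases hz : num = 0
  · simp [hz]; linarith
  · have h1 : 1 ≤ num := by omega
    have h2 : w ≤ w * num := le_mul_of_one_le_right (by linarith) h1
    simp [hz]; linarith

lemma stinv_close (c : Char) (hc : c = ')' ∨ c = ']') (ps' : List Char) (hop' : Opens ps')
    (num m : Int) (ns' : List Int) (hlen : ns'.length = ps'.length)
    (hnum0 : 0 ≤ num) (hm0 : 0 ≤ m) (hnn' : ∀ n ∈ ns', 0 ≤ n) (w : Int) (hw : 2 ≤ w) :
    StInv ps' ((m + (if num ≠ 0 then w * num else w)) :: ns') (some c) := by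
  have hpos := X_pos num m w hnum0 hm0 hw
  refine ⟨by simp [hlen], ?_, ?_⟩
  · intro n hn
    rcases List.mem_cons.mp hn with h | h
    · subst h; linarith
    · exact hnn' n h
  · cases ps' with
    | nil => trivial
    | cons q ps'' =>
      have hq : q = '(' ∨ q = '[' := hop' q (List.mem_cons_self ..)
      constructor
      · intro h; omega
      · intro h
        exfalso
        have hcq : c = q := by simpa using h
        rcases hc with h3 | h3 <;> rcases hq with h4 | h4 <;> subst h3 <;> simp [h4] at hcq
      
-- once a non-bracket character sits in A's stack, A returns 0
lemma runA_junk (cs : List Char) : ∀ ps ns, (∃ c ∈ ps, ¬(c = '(' ∨ c = '[')) →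
    runA cs ps ns = 0 := by
  induction cs with
  | nil =>
    intro ps ns ⟨c, hc, _⟩
    cases ps with
    | nil => simp at hc
    | cons p ps' => simp [runA]
  | cons c cs ih =>
    intro ps ns ⟨j, hj, hjo⟩
    by_cases hc : c = ')' ∨ c = ']'
    · cases ps with
      | nil => simp at hj
      | cons p ps' =>
        simp only [runA, if_pos hc]
        match ns with
        | [] => rfl
        | [n] => rfl
        | num :: m :: ns' =>
          by_cases hp : p = (if c = ')' then '(' else '[')
          · have hpo : p = '(' ∨ p = '[' := by
              rcases hc with h | h
              · left; simpa [h] using hp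
              · right; simpa [h] using hp
            have hj' : j ∈ ps' := by
              rcases List.mem_cons.mp hj with h | h
              · rw [h] at hjo; exact absurd hpo hjo
              · exact h
            simp only [if_pos hp]
            exact ih _ _ ⟨j, hj', hjo⟩
          · simp [hp]
    · simp only [runA, if_neg hc]
      exact ih _ _ ⟨j, List.mem_cons_of_mem _ hj, hjo⟩

lemma key (cs : List Char) : ∀ (ps : List Char) (ns : List Int) (prev : Option Char),
    Opens ps → StInv ps ns prev →
    runA cs ps ns = runB cs ps (weight ps) (val ps ns) prev := by
  induction cs with
  | nil =>
    intro ps ns prev _ ⟨hlen, _, _⟩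
    cases ps with
    | nil =>
      match ns, hlen with
      | [n], _ => simp [runA, runB, val]
    | cons p ps' => simp [runA, runB]
  | cons c cs ih =>
    intro ps ns prev hop ⟨hlen, hnn, htop⟩
    by_cases hcl : c = ')' ∨ c = ']'
    · -- closing bracket
      cases ps with
      | nil =>
        rcases hcl with h | h <;> subst h <;> simp [runA, runB]
      | cons p ps' =>
        have hpo : p = '(' ∨ p = '[' := hop p (List.mem_cons_self ..)
        have hop' : Opens ps' := fun x hx => hop x (List.mem_cons_of_mem _ hx)
        match ns, hlen with
        | num :: m :: ns', hlen =>
        have hlen' : ns'.length = ps'.length := by simpa using hlen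
        have hnum0 : 0 ≤ num := hnn num (by simp)
        have hm0 : 0 ≤ m := hnn m (by simp)
        have hnn' : ∀ n ∈ ns', 0 ≤ n := fun n hn => hnn n (by simp [hn])
        rcases hcl with hc0 | hc0 <;> subst hc0
        · -- c = ')'
          rcases hpo with hp1 | hp1 <;> subst hp1
          · -- p = '(' : matching close
            have htop' : num = 0 ↔ prev = some '(' := htop
            have hA : runA (')' :: cs) ('(' :: ps') (num :: m :: ns') =
                runA cs ps' ((m + (if num ≠ 0 then 2 * num else 2)) :: ns') := by
              simp [runA]
            have hw : weight ('(' :: ps') = 2 * weight ps' := by simp [weight]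
            rw [hA, runB_close_paren, hw, fd_cancel 2 (weight ps') (by decide),
              ih ps' _ (some ')') hop'
                (stinv_close ')' (Or.inl rfl) ps' hop' num m ns' hlen' hnum0 hm0 hnn' 2 (by decide))]
            congr 1
            by_cases hz : num = 0
            · have hprev := htop'.mp hz
              simp [hz, hprev, val, weight, val_addtop]
            · have hprev : ¬ prev = some '(' := fun h => hz (htop'.mpr h)
              simp [hz, hprev, val, weight, val_addtop]
              ring
          · -- p = '[' : mismatch, both 0
            simp [runA, runB]
        · -- c = ']'
          rcases hpo with hp1 | hp1 <;> subst hp1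
          · -- p = '(' : mismatch, both 0
            simp [runA, runB]
          · -- p = '[' : matching close
            have htop' : num = 0 ↔ prev = some '[' := htop
            have hA : runA (']' :: cs) ('[' :: ps') (num :: m :: ns') =
                runA cs ps' ((m + (if num ≠ 0 then 3 * num else 3)) :: ns') := by
              simp [runA]
            have hw : weight ('[' :: ps') = 3 * weight ps' := by simp [weight]
            rw [hA, runB_close_brack, hw, fd_cancel 3 (weight ps') (by decide),
              ih ps' _ (some ']') hop'
                (stinv_close ']' (Or.inr rfl) ps' hop' num m ns' hlen' hnum0 hm0 hnn' 3 (by decide))]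
            congr 1
            by_cases hz : num = 0
            · have hprev := htop'.mp hz
              simp [hz, hprev, val, weight, val_addtop]
            · have hprev : ¬ prev = some '[' := fun h => hz (htop'.mpr h)
              simp [hz, hprev, val, weight, val_addtop]
              ring
    · by_cases hob : c = '(' ∨ c = '['
      · -- opening bracket: push on both sides
        have hA : runA (c :: cs) ps ns = runA cs (c :: ps) (0 :: ns) := by
          simp only [runA, if_neg (by rcases hob with h | h <;> subst h <;> decide :
            ¬(c = ')' ∨ c = ']'))]
        have hop' : Opens (c :: ps) := by
          intro x hx; rcases List.mem_cons.mp hx with h | h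
          · subst h; exact hob
          · exact hop x h
        have hInv' : StInv (c :: ps) (0 :: ns) (some c) := by
          refine ⟨by simp [hlen], ?_, by simp⟩
          intro n hn
          rcases List.mem_cons.mp hn with h | h
          · subst h; exact le_refl 0
          · exact hnn n h
        have hval : val (c :: ps) (0 :: ns) = val ps ns := by simp [val]
        rcases hob with h | h <;> subst h
        · rw [hA, ih _ _ _ hop' hInv', hval, runB_open_paren]
          have hwt : weight ('(' :: ps) = weight ps * 2 := by simp [weight]; ring
          rw [hwt]
        · rw [hA, ih _ _ _ hop' hInv', hval, runB_open_brack]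
          have hwt : weight ('[' :: ps) = weight ps * 3 := by simp [weight]; ring
          rw [hwt]
      · -- non-bracket character: A pushes an unmatchable char, B returns 0
        push Not at hcl
        push Not at hob
        have hA : runA (c :: cs) ps ns = runA cs (c :: ps) (0 :: ns) := by
          simp only [runA, if_neg (by simp [hcl.1, hcl.2] : ¬(c = ')' ∨ c = ']'))]
        rw [hA, runA_junk cs (c :: ps) (0 :: ns)
          ⟨c, List.mem_cons_self .., by simp [hob.1, hob.2]⟩]
        simp [runB, hob.1, hob.2, hcl.1, hcl.2]

-- ===== VERDICT (by name: the statement is the Claim_ definition above) =====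
theorem solution_spec : Claim_equal_solution := by
  intro s _
  unfold Spec_solution solution solution_alt
  have h := key s.toList [] [0] none (by intro c hc; simp at hc)
    ⟨rfl, by intro n hn; simp at hn; omega, trivial⟩
  simpa [weight, val] using h
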